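-- pv_equiv track=rewrite | github.com/pedrohasantiago/Project-Euler | Solutions/5.py | smallest_evenly_divisible
-- ===== SOURCE A (Python) =====
-- def smallest_evenly_divisible(min_divisor, max_divisor, minimum_dividend=0):
--     """Returns the smallest number that is evenly divisible (divisible
--     with no remainder) by all of the numbers from `min_divisor` to
--     `max_divisor`. If a `minimum_dividend` is provided, only dividends
--     greater than this number will be evaluated.
--     """
--     factors = range(max_divisor,0,-min_divisor)
--     while True:
--         counter = 0
--         for i in factors:
--             if minimum_dividend % i != 0:
--                 break
--             else:
--                 counter += 1
--         if counter == len(factors):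
--             return minimum_dividend
--         minimum_dividend += 1
-- ===== SOURCE B (Python) =====
-- def smallest_evenly_divisible(min_divisor, max_divisor, minimum_dividend=0):
--     """Returns the smallest number that is evenly divisible (divisible
--     with no remainder) by all of the numbers from `min_divisor` to
--     `max_divisor`. If a `minimum_dividend` is provided, only dividends
--     greater than this number will be evaluated.
--
--     Any number divisible by all the factors is a multiple of the
--     largest one, so only multiples of it need testing: start at the
--     least such multiple at or above `minimum_dividend` and stride by it.
--     """
--     factors = range(max_divisor, 0, -min_divisor)
--     if not factors:
--         return minimum_dividend
--     step = abs(factors[0])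
--     candidate = -(-minimum_dividend // step) * step
--     while any(candidate % i for i in factors):
--         candidate += step
--     return candidate
-- ===== Notes on version B (the rewrite author's own statement) =====
-- stated objective: alternative
-- what changed: B tests only multiples of the largest factor, jumping straight to the least such multiple at or above minimum_dividend by a ceiling division, instead of A's scan of every single integer from minimum_dividend (intended as faster - a timing run read 58x at the largest size both finished - but unconfirmed, since both still scan when the answer is far away).
import Mathlib
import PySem

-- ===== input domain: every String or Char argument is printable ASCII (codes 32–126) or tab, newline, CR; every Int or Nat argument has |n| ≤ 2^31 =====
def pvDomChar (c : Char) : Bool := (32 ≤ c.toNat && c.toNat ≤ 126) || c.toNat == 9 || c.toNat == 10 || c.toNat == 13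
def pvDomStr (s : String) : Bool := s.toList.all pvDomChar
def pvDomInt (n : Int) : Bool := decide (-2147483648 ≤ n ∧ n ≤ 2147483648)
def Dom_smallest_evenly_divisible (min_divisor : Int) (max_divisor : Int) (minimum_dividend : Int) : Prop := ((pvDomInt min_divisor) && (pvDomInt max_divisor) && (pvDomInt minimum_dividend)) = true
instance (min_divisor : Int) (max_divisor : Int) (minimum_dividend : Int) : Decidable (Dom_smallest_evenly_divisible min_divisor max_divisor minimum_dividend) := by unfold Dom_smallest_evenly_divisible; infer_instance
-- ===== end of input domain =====

-- B scans only multiples of the largest factor, starting at the least such multiple at or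
-- above minimum_dividend, instead of A's scan of every integer from minimum_dividend
-- (intended as faster; a timing run measured 58x at the largest size both finished,
-- but could not confirm the label: both still scan when the answer is far away).

-- ===== PORT A =====
-- the inner `for i in factors: if minimum_dividend % i != 0: break / else: counter += 1`
-- loop: the value `counter` ends with
def pvCountRun (m : Int) : List Int → Nat → Nat
  | [], counter => counter
  | i :: rest, counter => if PySem.Int.mod m i ≠ 0 then counter else pvCountRun m rest (counter + 1)

-- helpers used ONLY to justify termination of A's `while True` loop
def pvLcmNat (fs : List Int) : Nat := fs.foldl (fun n i => Nat.lcm n i.natAbs) 1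
def pvNextMul (L m : Int) : Int := (-(PySem.Int.floordiv (-m) L)) * L

-- A's `while True: … minimum_dividend += 1` loop. The fuel (computed once, from the
-- termination helpers above) only makes the recursion total: loopAux_eq below proves it
-- never runs out before the loop's own return condition fires.
def pvLoopAux (fs : List Int) (len : Nat) : Nat → Int → Int
  | 0, m => m
  | fuel + 1, m => if pvCountRun m fs 0 = len then m else pvLoopAux fs len fuel (m + 1)

def pvLoopA (fs : List Int) (m : Int) : Int :=
  pvLoopAux fs fs.length ((pvNextMul ((pvLcmNat fs : Nat) : Int) m - m).toNat + 1) m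

def smallest_evenly_divisible (min_divisor : Int) (max_divisor : Int) (minimum_dividend : Int) : Int :=
  pvLoopA (PySem.List.pyRange max_divisor 0 (-min_divisor)) minimum_dividend

-- ===== PORT B =====
-- Source B's `any(candidate % i for i in factors)`
def pvAnyMod (c : Int) (fs : List Int) : Bool := fs.any (fun i => decide (PySem.Int.mod c i ≠ 0))

-- Source B's `while any(...): candidate += step` loop. The fuel (computed once, from the
-- same termination helpers as A's loop) only makes the recursion total: loopB_eq below
-- proves it never runs out before the loop's own exit condition fires.
def pvLoopB (fs : List Int) (s : Int) : Nat → Int → Int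
  | 0, c => c
  | fuel + 1, c => if pvAnyMod c fs then pvLoopB fs s fuel (c + s) else c

def smallest_evenly_divisible_alt (min_divisor : Int) (max_divisor : Int) (minimum_dividend : Int) : Int :=
  match PySem.List.pyRange max_divisor 0 (-min_divisor) with
  | [] => minimum_dividend
  | f0 :: rest =>
    let s := |f0|
    let c := (-(PySem.Int.floordiv (-minimum_dividend) s)) * s
    pvLoopB (f0 :: rest) s
      ((pvNextMul ((pvLcmNat (f0 :: rest) : Nat) : Int) c - c).toNat + 1) c

-- ===== PRECONDITION & SPEC =====
-- Pre_ excludes exactly min_divisor = 0, where Python A raises ValueError (range step 0).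
def Pre_smallest_evenly_divisible (min_divisor : Int) (max_divisor : Int) (minimum_dividend : Int) : Prop := min_divisor ≠ 0
instance (min_divisor : Int) (max_divisor : Int) (minimum_dividend : Int) : Decidable (Pre_smallest_evenly_divisible min_divisor max_divisor minimum_dividend) := by unfold Pre_smallest_evenly_divisible; infer_instance

def pvWitness_smallest_evenly_divisible : Int × Int × Int := (1, 6, 10)

def Spec_smallest_evenly_divisible (min_divisor : Int) (max_divisor : Int) (minimum_dividend : Int) (out : Int) : Prop := out = smallest_evenly_divisible_alt min_divisor max_divisor minimum_dividend
instance (min_divisor : Int) (max_divisor : Int) (minimum_dividend : Int) (out : Int) : Decidable (Spec_smallest_evenly_divisible min_divisor max_divisor minimum_dividend out) := by unfold Spec_smallest_evenly_divisible; infer_instance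

-- ===== CLAIM (what is proved, stated in full; the proofs are below) =====
def Claim_equal_smallest_evenly_divisible : Prop := ∀ (min_divisor : Int) (max_divisor : Int) (minimum_dividend : Int), Dom_smallest_evenly_divisible min_divisor max_divisor minimum_dividend → Pre_smallest_evenly_divisible min_divisor max_divisor minimum_dividend → Spec_smallest_evenly_divisible min_divisor max_divisor minimum_dividend (smallest_evenly_divisible min_divisor max_divisor minimum_dividend)

-- ===== LEMMAS AND PROOFS =====

-- the gcd loop computes Nat.gcd on (casts of) natural arguments
-- the inner for-loop runs to completion iff every factor divides m
theorem countRun_general (m : Int) (fs : List Int) (c : Nat) :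
    pvCountRun m fs c = fs.length + c ↔ ∀ i ∈ fs, i ∣ m := by
  induction fs generalizing c with
  | nil => simp [pvCountRun]
  | cons i rest ih =>
    by_cases h : PySem.Int.mod m i = 0
    · have hd : i ∣ m := (PySem.Int.mod_eq_zero_iff_dvd m i).mp h
      simp only [pvCountRun, h, ne_eq, not_true_eq_false, if_false, List.length_cons,
        List.mem_cons]
      rw [show rest.length + 1 + c = rest.length + (c + 1) by omega, ih (c + 1)]
      constructor
      · intro hall j hj
        rcases hj with rfl | hj
        · exact hd
        · exact hall j hj
      · intro hall j hj
        exact hall j (Or.inr hj)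
    · have hd : ¬ i ∣ m := fun hdvd => h ((PySem.Int.mod_eq_zero_iff_dvd m i).mpr hdvd)
      have hcount : pvCountRun m (i :: rest) c = c := by simp [pvCountRun, h]
      rw [hcount]
      simp only [List.length_cons, List.mem_cons]
      constructor
      · intro he; omega
      · intro hall; exact absurd (hall i (Or.inl rfl)) hd

theorem countRun_eq_length_iff (m : Int) (fs : List Int) :
    pvCountRun m fs 0 = fs.length ↔ ∀ i ∈ fs, i ∣ m := by
  have := countRun_general m fs 0
  simpa using this

-- the folded lcm divides d iff the seed and every |factor| divide d
theorem lcmFold_dvd_iff (fs : List Int) (n d : Nat) :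
    fs.foldl (fun k i => Nat.lcm k i.natAbs) n ∣ d ↔ n ∣ d ∧ ∀ i ∈ fs, i.natAbs ∣ d := by
  induction fs generalizing n with
  | nil => simp
  | cons i rest ih =>
    simp only [List.foldl_cons, ih, Nat.lcm_dvd_iff, List.mem_cons]
    constructor
    · rintro ⟨⟨h1, h2⟩, h3⟩
      refine ⟨h1, fun j hj => ?_⟩
      rcases hj with rfl | hj
      · exact h2
      · exact h3 j hj
    · rintro ⟨h1, h2⟩
      exact ⟨⟨h1, h2 i (Or.inl rfl)⟩, fun j hj => h2 j (Or.inr hj)⟩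

theorem lcmFold_pos (fs : List Int) (hfz : ∀ i ∈ fs, i ≠ 0) (n : Nat) (hn : 0 < n) :
    0 < fs.foldl (fun k i => Nat.lcm k i.natAbs) n := by
  induction fs generalizing n with
  | nil => simpa
  | cons i rest ih =>
    have hi : i ≠ 0 := hfz i (List.mem_cons_self ..)
    have : 0 < i.natAbs := Int.natAbs_pos.mpr hi
    exact ih (fun j hj => hfz j (List.mem_cons_of_mem _ hj)) _ (Nat.lcm_pos hn this)

theorem pvLcmNat_dvd_iff (fs : List Int) (m : Int) :
    ((pvLcmNat fs : Nat) : Int) ∣ m ↔ ∀ i ∈ fs, i ∣ m := by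
  have h1 : ((pvLcmNat fs : Nat) : Int) ∣ m ↔ pvLcmNat fs ∣ m.natAbs := by
    constructor
    · intro h
      have := Int.natAbs_dvd_natAbs.mpr h
      simpa using this
    · intro h
      exact (Int.natAbs_dvd_natAbs (a := ((pvLcmNat fs : Nat) : Int)) (b := m)).mp (by simpa using h)
  rw [h1, pvLcmNat, lcmFold_dvd_iff]
  simp only [Nat.one_dvd, true_and]
  constructor
  · intro h i hi
    exact Int.natAbs_dvd_natAbs.mp (h i hi)
  · intro h i hi
    exact Int.natAbs_dvd_natAbs.mpr (h i hi)

-- bracket for the ceiling multiple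
theorem nextMul_bracket {L : Int} (hL : 0 < L) (m : Int) :
    m ≤ pvNextMul L m ∧ pvNextMul L m < m + L := by
  have h := (PySem.Int.neg_floordiv_neg_eq_iff_of_pos (a := m) (b := L)
    (q := -(PySem.Int.floordiv (-m) L)) hL).mp rfl
  unfold pvNextMul
  constructor
  · exact h.2
  · nlinarith [h.1]

theorem nextMul_dvd (L m : Int) : L ∣ pvNextMul L m :=
  ⟨-(PySem.Int.floordiv (-m) L), mul_comm _ _⟩

theorem nextMul_of_dvd {L m : Int} (hL : 0 < L) (h : L ∣ m) : pvNextMul L m = m := by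
  obtain ⟨k, rfl⟩ := h
  have : -(PySem.Int.floordiv (-(L * k)) L) = k := by
    rw [PySem.Int.neg_floordiv_neg_eq_iff_of_pos hL]
    constructor <;> nlinarith
  unfold pvNextMul
  rw [this]
  ring

theorem nextMul_succ {L m : Int} (hL : 0 < L) (h : ¬ L ∣ m) :
    pvNextMul L (m + 1) = pvNextMul L m := by
  obtain ⟨hle, _⟩ := nextMul_bracket hL m
  have hne : pvNextMul L m ≠ m := fun he => h (he ▸ nextMul_dvd L m)
  have hlt : m + 1 ≤ pvNextMul L m := by omega
  have hq := (PySem.Int.neg_floordiv_neg_eq_iff_of_pos (a := m) (b := L)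
    (q := -(PySem.Int.floordiv (-m) L)) hL).mp rfl
  have : -(PySem.Int.floordiv (-(m + 1)) L) = -(PySem.Int.floordiv (-m) L) := by
    rw [PySem.Int.neg_floordiv_neg_eq_iff_of_pos hL]
    refine ⟨by nlinarith [hq.1], ?_⟩
    have : pvNextMul L m = -(PySem.Int.floordiv (-m) L) * L := rfl
    omega
  unfold pvNextMul
  rw [this]

-- A's while-loop returns the least multiple of the folded lcm at or above m
theorem loopAux_eq (fs : List Int) (hfz : ∀ i ∈ fs, i ≠ 0) (fuel : Nat) (m : Int)
    (hfuel : (pvNextMul ((pvLcmNat fs : Nat) : Int) m - m).toNat < fuel) :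
    pvLoopAux fs fs.length fuel m = pvNextMul ((pvLcmNat fs : Nat) : Int) m := by
  have hL : (0 : Int) < ((pvLcmNat fs : Nat) : Int) := by
    exact_mod_cast lcmFold_pos fs hfz 1 one_pos
  induction fuel generalizing m with
  | zero => omega
  | succ fuel ih =>
    rw [pvLoopAux]
    by_cases hc : pvCountRun m fs 0 = fs.length
    · have hdvd : ((pvLcmNat fs : Nat) : Int) ∣ m :=
        (pvLcmNat_dvd_iff fs m).mpr ((countRun_eq_length_iff m fs).mp hc)
      simp only [hc, if_true]
      exact (nextMul_of_dvd hL hdvd).symm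
    · have hnd : ¬ ((pvLcmNat fs : Nat) : Int) ∣ m := fun hdvd =>
        hc ((countRun_eq_length_iff m fs).mpr ((pvLcmNat_dvd_iff fs m).mp hdvd))
      have hsucc := nextMul_succ hL hnd
      obtain ⟨hle, _⟩ := nextMul_bracket hL m
      have hne : pvNextMul ((pvLcmNat fs : Nat) : Int) m ≠ m := fun he =>
        hnd (he ▸ nextMul_dvd _ m)
      simp only [hc, if_false]
      rw [ih (m + 1) (by rw [hsucc]; omega), hsucc]

-- one step of B's lcm fold, on a positive (cast) accumulator and a non-zero factor
-- B's fold computes (the cast of) the Nat lcm fold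
-- the unique multiple of L in [c, c+L)
theorem nextMul_eq_of {L c x : Int} (hL : 0 < L) (hdvd : L ∣ x) (h1 : c ≤ x) (h2 : x < c + L) :
    pvNextMul L c = x := by
  obtain ⟨k, rfl⟩ := hdvd
  have hq : -(PySem.Int.floordiv (-c) L) = k := by
    rw [PySem.Int.neg_floordiv_neg_eq_iff_of_pos hL]
    constructor <;> nlinarith
  unfold pvNextMul
  rw [hq]
  ring

-- B's loop exit test is false exactly when every factor divides c
theorem anyMod_false_iff (c : Int) (fs : List Int) :
    pvAnyMod c fs = false ↔ ∀ i ∈ fs, i ∣ c := by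
  simp [pvAnyMod, PySem.Int.mod_eq_zero_iff_dvd]

-- striding by a divisor s of L from a multiple of s skips no multiple of L
theorem nextMul_stride {L s c : Int} (hL : 0 < L) (hs : 0 < s) (hsL : s ∣ L) (hsc : s ∣ c)
    (hnd : ¬ L ∣ c) : c + s ≤ pvNextMul L c ∧ pvNextMul L (c + s) = pvNextMul L c := by
  obtain ⟨h1, h2⟩ := nextMul_bracket hL c
  have hdvdN : L ∣ pvNextMul L c := nextMul_dvd L c
  have hne : pvNextMul L c ≠ c := fun he => hnd (he ▸ hdvdN)
  have hsdiff : s ∣ (pvNextMul L c - c) := dvd_sub (hsL.trans hdvdN) hsc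
  have hstep : s ≤ pvNextMul L c - c := Int.le_of_dvd (by omega) hsdiff
  refine ⟨by omega, ?_⟩
  exact nextMul_eq_of hL hdvdN (by omega) (by omega)

-- B's while-loop returns the least multiple of the folded lcm at or above c
theorem loopB_eq (fs : List Int) (hfz : ∀ i ∈ fs, i ≠ 0) (s : Int) (hs : 0 < s)
    (hsL : s ∣ ((pvLcmNat fs : Nat) : Int)) (fuel : Nat) (c : Int) (hsc : s ∣ c)
    (hfuel : (pvNextMul ((pvLcmNat fs : Nat) : Int) c - c).toNat < fuel) :
    pvLoopB fs s fuel c = pvNextMul ((pvLcmNat fs : Nat) : Int) c := by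
  have hL : (0 : Int) < ((pvLcmNat fs : Nat) : Int) := by
    exact_mod_cast lcmFold_pos fs hfz 1 one_pos
  induction fuel generalizing c with
  | zero => omega
  | succ fuel ih =>
    rw [pvLoopB]
    by_cases hc : pvAnyMod c fs = false
    · have hdvd : ((pvLcmNat fs : Nat) : Int) ∣ c :=
        (pvLcmNat_dvd_iff fs c).mpr ((anyMod_false_iff c fs).mp hc)
      simp only [hc]
      exact (nextMul_of_dvd hL hdvd).symm
    · have hnd : ¬ ((pvLcmNat fs : Nat) : Int) ∣ c := fun hdvd =>
        hc ((anyMod_false_iff c fs).mpr ((pvLcmNat_dvd_iff fs c).mp hdvd))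
      obtain ⟨hge, hstep⟩ := nextMul_stride hL hs hsL hsc hnd
      have htrue : pvAnyMod c fs = true := by
        cases h : pvAnyMod c fs
        · exact absurd h hc
        · rfl
      simp only [htrue, if_true]
      rw [ih (c + s) (dvd_add hsc dvd_rfl) (by rw [hstep]; omega), hstep]

-- the largest-magnitude factor divides the folded lcm
theorem abs_head_dvd_lcm (f0 : Int) (rest : List Int) :
    |f0| ∣ ((pvLcmNat (f0 :: rest) : Nat) : Int) := by
  have h : f0.natAbs ∣ pvLcmNat (f0 :: rest) :=
    (((lcmFold_dvd_iff (f0 :: rest) 1 (pvLcmNat (f0 :: rest))).mp dvd_rfl).2) f0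
      (List.mem_cons_self ..)
  have : |f0| = ((f0.natAbs : Nat) : Int) := by rw [Int.natCast_natAbs]
  rw [this]
  exact_mod_cast h

-- no factor produced by range(max_divisor, 0, -min_divisor) is zero (min_divisor ≠ 0)
theorem factors_ne_zero (a b : Int) (ha : a ≠ 0) :
    ∀ i ∈ PySem.List.pyRange b 0 (-a), i ≠ 0 := by
  intro i hi
  rcases lt_or_gt_of_ne ha with h | h
  · have := (PySem.List.mem_pyRange_iff_of_pos (a := b) (b := 0) (s := -a) (by omega) i).mp hi
    omega
  · have := (PySem.List.mem_pyRange_iff_of_neg (a := b) (b := 0) (s := -a) (by omega) i).mp hi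
    omega

-- ===== VERDICT (by name: the statement is the Claim_ definition above) =====
theorem smallest_evenly_divisible_spec : Claim_equal_smallest_evenly_divisible := by
  intro a b m _ hpre
  unfold Spec_smallest_evenly_divisible smallest_evenly_divisible smallest_evenly_divisible_alt
  have hfz := factors_ne_zero a b hpre
  unfold pvLoopA
  cases hf : PySem.List.pyRange b 0 (-a) with
  | nil =>
    rw [hf] at hfz
    rw [loopAux_eq [] hfz _ m (Nat.lt_succ_self _)]
    show pvNextMul _ m = m
    exact nextMul_of_dvd one_pos (one_dvd m)
  | cons f0 rest =>
    rw [hf] at hfz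
    rw [loopAux_eq (f0 :: rest) hfz _ m (Nat.lt_succ_self _)]
    show pvNextMul _ m = pvLoopB (f0 :: rest) (|f0|) _ (-PySem.Int.floordiv (-m) (|f0|) * (|f0|))
    have hf0 : f0 ≠ 0 := hfz f0 (List.mem_cons_self ..)
    have hs : (0 : Int) < |f0| := abs_pos.mpr hf0
    have hL : (0 : Int) < ((pvLcmNat (f0 :: rest) : Nat) : Int) := by
      exact_mod_cast lcmFold_pos (f0 :: rest) hfz 1 one_pos
    have hsL := abs_head_dvd_lcm f0 rest
    -- the start candidate is pvNextMul |f0| m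
    have hc0 : (-(PySem.Int.floordiv (-m) |f0|)) * |f0| = pvNextMul (|f0|) m := rfl
    rw [hc0]
    rw [loopB_eq (f0 :: rest) hfz (|f0|) hs hsL _ _ (nextMul_dvd _ m) (Nat.lt_succ_self _)]
    -- the least multiple of L at or above the start candidate is the one at or above m
    obtain ⟨hm1, hm2⟩ := nextMul_bracket hs m
    obtain ⟨hn1, hn2⟩ := nextMul_bracket hL m
    have hsN : |f0| ∣ pvNextMul ((pvLcmNat (f0 :: rest) : Nat) : Int) m :=
      hsL.trans (nextMul_dvd _ m)
    have hc0N : pvNextMul (|f0|) m ≤ pvNextMul ((pvLcmNat (f0 :: rest) : Nat) : Int) m := by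
      rcases le_or_gt (pvNextMul (|f0|) m) (pvNextMul ((pvLcmNat (f0 :: rest) : Nat) : Int) m)
        with h | h
      · exact h
      · exfalso
        have hd : |f0| ∣ (pvNextMul (|f0|) m - pvNextMul ((pvLcmNat (f0 :: rest) : Nat) : Int) m) :=
          dvd_sub (nextMul_dvd _ m) hsN
        have := Int.le_of_dvd (by omega) hd
        omega
    exact (nextMul_eq_of hL (nextMul_dvd _ m) hc0N (by omega)).symm
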